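-- pv_equiv track=rewrite | github.com/DeepDroneAI/Havelsan-Demo | main.py | find_airsim_initial_poses
-- ===== SOURCE A (Python) =====
-- def find_airsim_initial_poses(n_agents):
--     x_initial=0
--     y_initial=0
--     positions=[]
--     pose_x=x_initial
--     pose_y=y_initial
--     for i in range(n_agents):
--         pose_x=x_initial-4*int(i/10)
--         pose_y=y_initial+4*int(i-int(i/10)*10)
--         positions.append([pose_x,pose_y,0])
--     return positions
-- ===== SOURCE B (Python) =====
-- def find_airsim_initial_poses(n_agents):
--     positions = []
--     count = 0
--     col = 0
--     while count < n_agents: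
--         for row in range(10):
--             if count == n_agents:
--                 break
--             positions.append([-4 * col, 4 * row, 0])
--             count += 1
--         col += 1
--     return positions
-- ===== Notes on version B (the rewrite author's own statement) =====
-- stated objective: alternative
-- what changed: Replaces A's single flat index loop, which recovers column and row from i via division and remainder, with a nested column/row loop that enumerates grid coordinates directly and stops via a counter.
import Mathlib
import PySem

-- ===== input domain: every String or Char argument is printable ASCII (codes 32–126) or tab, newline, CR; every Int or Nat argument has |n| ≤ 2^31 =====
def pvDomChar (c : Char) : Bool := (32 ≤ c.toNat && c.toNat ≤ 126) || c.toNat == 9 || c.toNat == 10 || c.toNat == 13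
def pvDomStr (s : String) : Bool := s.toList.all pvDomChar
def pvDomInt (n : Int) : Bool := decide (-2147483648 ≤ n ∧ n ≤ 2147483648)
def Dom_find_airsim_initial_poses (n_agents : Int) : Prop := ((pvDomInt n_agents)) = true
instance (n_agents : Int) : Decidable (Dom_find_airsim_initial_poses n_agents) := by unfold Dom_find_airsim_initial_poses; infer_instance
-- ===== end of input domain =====

-- B replaces A's flat index loop (column/row recovered by division) with a nested
-- column/row loop and a counter; same output, different decomposition (objective: alternative).


-- ===== PORT A =====
-- int(i/10) is ported as PySem.Int.truncdiv i 10, exact for |i| < 2^53 (here 0 ≤ i ≤ 2^31).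
def find_airsim_initial_poses (n_agents : Int) : List (List Int) :=
  let x_initial : Int := 0
  let y_initial : Int := 0
  (PySem.List.pyRange 0 n_agents 1).foldl
    (fun positions i =>
      let pose_x := x_initial - 4 * PySem.Int.truncdiv i 10
      let pose_y := y_initial + 4 * (i - PySem.Int.truncdiv i 10 * 10)
      positions ++ [[pose_x, pose_y, 0]])
    []

-- ===== PORT B =====
-- inner 'for row in range(10)' loop with its conditional break, over the remaining rows
def pvAltInner (rows : List Nat) (col count n : Int) (acc : List (List Int)) :
    Int × List (List Int) :=
  match rows with
  | [] => (count, acc)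
  | row :: rs =>
      if count = n then (count, acc)
      else pvAltInner rs col (count + 1) n (acc ++ [[-4 * col, 4 * (row : Int), 0]])

-- the first component of pvAltInner stays between count and n (needed for termination below)
theorem pvAltInner_fst_bounds (rows : List Nat) (col count n : Int)
    (acc : List (List Int)) (h : count ≤ n) :
    count ≤ (pvAltInner rows col count n acc).1 ∧ (pvAltInner rows col count n acc).1 ≤ n := by
  induction rows generalizing count acc with
  | nil => exact ⟨le_refl _, h⟩
  | cons r rs ih =>
    simp only [pvAltInner]
    split
    · exact ⟨le_refl _, h⟩
    · rename_i hne
      have h1 : count + 1 ≤ n := by omega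
      have := ih (count + 1) (acc ++ [[-4 * col, 4 * (r : Int), 0]]) h1
      exact ⟨by omega, this.2⟩

theorem pvAltInner_fst_lt (rows : List Nat) (col count n : Int)
    (acc : List (List Int)) (h : count < n) (hne : rows ≠ []) :
    count < (pvAltInner rows col count n acc).1 := by
  cases rows with
  | nil => exact absurd rfl hne
  | cons r rs =>
    simp only [pvAltInner]
    rw [if_neg (by omega)]
    have := pvAltInner_fst_bounds rs col (count + 1) n
      (acc ++ [[-4 * col, 4 * (r : Int), 0]]) (by omega)
    omega

-- outer 'while count < n_agents' loop
def pvAltOuter (col count n : Int) (acc : List (List Int)) : List (List Int) :=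
  if h : count < n then
    let p := pvAltInner (List.range 10) col count n acc
    pvAltOuter (col + 1) p.1 n p.2
  else acc
termination_by (n - count).toNat
decreasing_by
  have h1 := pvAltInner_fst_lt (List.range 10) col count n acc h (by decide)
  omega

def find_airsim_initial_poses_alt (n_agents : Int) : List (List Int) :=
  pvAltOuter 0 0 n_agents []

-- ===== PRECONDITION & SPEC =====
def Spec_find_airsim_initial_poses (n_agents : Int) (out : List (List Int)) : Prop := out = find_airsim_initial_poses_alt n_agents
instance (n_agents : Int) (out : List (List Int)) : Decidable (Spec_find_airsim_initial_poses n_agents out) := by unfold Spec_find_airsim_initial_poses; infer_instance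

-- ===== CLAIM (what is proved, stated in full; the proofs are below) =====
def Claim_equal_find_airsim_initial_poses : Prop := ∀ (n_agents : Int), Dom_find_airsim_initial_poses n_agents → Spec_find_airsim_initial_poses n_agents (find_airsim_initial_poses n_agents)

-- ===== LEMMAS AND PROOFS =====

-- the position of the agent with flat index i
def pvPose (i : Nat) : List Int := [-4 * ((i / 10 : Nat) : Int), 4 * ((i % 10 : Nat) : Int), 0]

theorem pvA_closed (m : Nat) :
    find_airsim_initial_poses (m : Int) = (List.range m).map pvPose := by
  unfold find_airsim_initial_poses
  rw [PySem.List.pyRange_zero_natCast m]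
  rw [List.foldl_map, PySem.List.foldl_append_singleton_eq_map, List.nil_append]
  refine List.map_congr_left (fun i _ => ?_)
  have htd : PySem.Int.truncdiv (i : Int) 10 = ((i / 10 : Nat) : Int) := by
    simp [PySem.Int.truncdiv]
  simp only [htd, pvPose, List.cons.injEq]
  refine ⟨by omega, by push_cast; omega, by simp⟩

-- the inner loop appends min rows.length (n - count) entries and advances count by that much
theorem pvAltInner_spec (rows : List Nat) (col count n : Int)
    (acc : List (List Int)) (h : count ≤ n) :
    pvAltInner rows col count n acc =
      (count + (min rows.length (n - count).toNat : Nat),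
       acc ++ (rows.take (min rows.length (n - count).toNat)).map
         (fun (r : Nat) => ([-4 * col, 4 * (r : Int), 0] : List Int))) := by
  induction rows generalizing count acc with
  | nil => simp [pvAltInner]
  | cons r rs ih =>
    simp only [pvAltInner]
    by_cases hc : count = n
    · subst hc
      simp
    · rw [if_neg hc]
      rw [ih (count + 1) _ (by omega)]
      have hk : min (r :: rs).length (n - count).toNat
          = min rs.length (n - (count + 1)).toNat + 1 := by
        simp only [List.length_cons]
        omega
      rw [hk]
      simp only [Prod.mk.injEq]
      refine ⟨by push_cast; ring, ?_⟩
      rw [List.take_succ_cons, List.map_cons, List.append_assoc, List.singleton_append]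

-- the outer loop, started at the top of column c with count = 10*c, produces the
-- remaining m agents' poses
theorem pvAltOuter_spec (m : Nat) : ∀ (c : Nat) (acc : List (List Int)),
    pvAltOuter (c : Int) (10 * c) (10 * c + m) acc =
      acc ++ (List.range m).map (fun j => pvPose (10 * c + j)) := by
  induction m using Nat.strong_induction_on with
  | _ m ih =>
    intro c acc
    rw [pvAltOuter]
    by_cases hm : m = 0
    · subst hm; simp
    · rw [dif_pos (by omega)]
      rw [pvAltInner_spec _ _ _ _ _ (by omega)]
      have htn : ((10 * (c : Int) + m) - 10 * c).toNat = m := by omega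
      rw [htn]
      simp only [List.length_range]
      by_cases h10 : 10 ≤ m
      · have hk : min 10 m = 10 := by omega
        rw [hk]
        have hcount : (10 : Int) * c + ((10 : Nat) : Int) = 10 * ((c + 1 : Nat) : Int) := by
          push_cast; ring
        have hn : (10 : Int) * c + m = 10 * ((c + 1 : Nat) : Int) + ((m - 10 : Nat) : Int) := by
          push_cast; omega
        have hcol : (c : Int) + 1 = ((c + 1 : Nat) : Int) := by norm_cast
        rw [hcount, hn, hcol, ih (m - 10) (by omega) (c + 1)]
        rw [List.append_assoc]
        congr 1
        have hr : List.range m = List.range 10 ++ (List.range (m - 10)).map (10 + ·) := by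
          have : m = 10 + (m - 10) := by omega
          rw [this, List.range_add]
          simp
        rw [hr, List.map_append, List.map_map]
        congr 1
        · rw [List.take_of_length_le (by simp)]
          refine List.map_congr_left (fun r hr' => ?_)
          have hrlt : r < 10 := List.mem_range.mp hr'
          simp only [pvPose]
          have hd : (10 * c + r) / 10 = c := by omega
          have hm' : (10 * c + r) % 10 = r := by omega
          rw [hd, hm']
        · refine List.map_congr_left (fun j _ => ?_)
          simp only [Function.comp, pvPose]
          congr 2 <;> [skip; skip] <;> congr 1 <;> omega
      · have hk : min 10 m = m := by omega
        rw [hk]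
        have hstop : (10 : Int) * c + m = 10 * c + (m : Nat) := by push_cast; ring
        rw [pvAltOuter, dif_neg (by omega)]
        congr 1
        rw [List.take_range]
        have : min m 10 = m := by omega
        rw [this]
        refine List.map_congr_left (fun r hr' => ?_)
        have hrlt : r < 10 := by
          have := List.mem_range.mp hr'; omega
        simp only [pvPose]
        have hd : (10 * c + r) / 10 = c := by omega
        have hm' : (10 * c + r) % 10 = r := by omega
        rw [hd, hm']

theorem pvB_closed (m : Nat) :
    find_airsim_initial_poses_alt (m : Int) = (List.range m).map pvPose := by
  unfold find_airsim_initial_poses_alt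
  have := pvAltOuter_spec m 0 []
  simpa using this

-- ===== VERDICT (by name: the statement is the Claim_ definition above) =====
theorem find_airsim_initial_poses_spec : Claim_equal_find_airsim_initial_poses := by
  intro n hdom
  unfold Spec_find_airsim_initial_poses
  by_cases hn : 0 ≤ n
  · obtain ⟨m, rfl⟩ := Int.eq_ofNat_of_zero_le hn
    rw [pvA_closed, pvB_closed]
  · have hA : find_airsim_initial_poses n = [] := by
      simp only [find_airsim_initial_poses]
      have he : PySem.List.pyRange 0 n 1 = [] := by
        simp [PySem.List.pyRange]; omega
      rw [he]
      rfl
    have hB : find_airsim_initial_poses_alt n = [] := by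
      unfold find_airsim_initial_poses_alt
      rw [pvAltOuter, dif_neg (by omega)]
    rw [hA, hB]
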